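-- pv_equiv track=rewrite | github.com/Jess-is-it/threejmon | app/notifiers/offline.py | _ensure_mysql_db
-- ===== SOURCE A (Python) =====
-- def _mysql_prefix_has_arg(prefix: list[str], *names: str) -> bool:
--     for tok in prefix:
--         if tok in names:
--             return True
--         for name in names:
--             if tok.startswith(name + "="):
--                 return True
--     return False
--
-- def _ensure_mysql_db(prefix: list[str], default_db: str) -> list[str]:
--     out = list(prefix)
--     if _mysql_prefix_has_arg(out, "-D", "--database"):
--         return out
--     for i, tok in enumerate(out):
--         if tok and not tok.startswith("-") and tok not in ("sudo", "mysql"):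
--             return out
--     out.append(default_db)
--     return out
-- ===== SOURCE B (Python) =====
-- def _ensure_mysql_db(prefix: list[str], default_db: str) -> list[str]:
--     out = list(prefix)
--     needs_db = True
--     for tok in out:
--         if tok in ("-D", "--database") or tok.startswith("-D=") or tok.startswith("--database="):
--             needs_db = False
--             break
--         if tok and not tok.startswith("-") and tok not in ("sudo", "mysql"):
--             needs_db = False
--             break
--     if needs_db:
--         out.append(default_db)
--     return out
-- ===== Notes on version B (the rewrite author's own statement) =====
-- stated objective: simpler
-- what changed: Inlined the _mysql_prefix_has_arg helper and fused A's two separate scans (full db-arg scan, then positional scan) into one single pass with a needs_db flag that breaks at the first deciding token.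
import Mathlib
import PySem

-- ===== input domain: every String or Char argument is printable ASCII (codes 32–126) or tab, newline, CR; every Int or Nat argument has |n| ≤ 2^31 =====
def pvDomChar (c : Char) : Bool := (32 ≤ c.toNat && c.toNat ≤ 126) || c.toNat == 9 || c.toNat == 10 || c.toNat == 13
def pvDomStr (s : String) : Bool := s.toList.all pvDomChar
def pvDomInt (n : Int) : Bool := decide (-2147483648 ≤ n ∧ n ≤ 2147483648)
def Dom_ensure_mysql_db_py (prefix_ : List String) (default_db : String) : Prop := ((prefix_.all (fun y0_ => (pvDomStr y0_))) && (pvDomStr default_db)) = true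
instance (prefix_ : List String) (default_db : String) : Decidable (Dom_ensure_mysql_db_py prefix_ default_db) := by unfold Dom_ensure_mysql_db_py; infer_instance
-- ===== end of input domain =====

-- B fuses A's two scans (helper db-arg scan, then positional scan) into one early-exit pass with a flag; objective: simpler.

-- ===== PORT A =====
-- literal port of _mysql_prefix_has_arg (names is the varargs tuple)
def mysql_prefix_has_arg : List String → List String → Bool
  | [], _ => false
  | tok :: rest, names =>
    if names.contains tok then true
    else if names.any (fun name => PySem.Str.startswith tok (name ++ "=")) then true
    else mysql_prefix_has_arg rest names

-- literal port of A's second loop: returns out at the first positional token, else appends default_db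
def ensure_mysql_db_scan (rem : List String) (out : List String) (default_db : String) : List String :=
  match rem with
  | [] => out ++ [default_db]
  | tok :: rest =>
    if tok ≠ "" && !(PySem.Str.startswith tok "-") && !(tok == "sudo" || tok == "mysql") then out
    else ensure_mysql_db_scan rest out default_db

def ensure_mysql_db_py (prefix_ : List String) (default_db : String) : List String :=
  let out := prefix_
  if mysql_prefix_has_arg out ["-D", "--database"] then out
  else ensure_mysql_db_scan out out default_db

-- ===== PORT B =====
-- single pass: needs_db flag, break on a db argument or a positional token
def ensure_mysql_db_needs (rem : List String) : Bool :=
  match rem with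
  | [] => true
  | tok :: rest =>
    if tok == "-D" || tok == "--database" || PySem.Str.startswith tok "-D=" || PySem.Str.startswith tok "--database=" then false
    else if tok ≠ "" && !(PySem.Str.startswith tok "-") && !(tok == "sudo" || tok == "mysql") then false
    else ensure_mysql_db_needs rest

def ensure_mysql_db_py_alt (prefix_ : List String) (default_db : String) : List String :=
  if ensure_mysql_db_needs prefix_ then prefix_ ++ [default_db] else prefix_

-- ===== PRECONDITION & SPEC =====
def Spec_ensure_mysql_db_py (prefix_ : List String) (default_db : String) (out : List String) : Prop := out = ensure_mysql_db_py_alt prefix_ default_db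
instance (prefix_ : List String) (default_db : String) (out : List String) : Decidable (Spec_ensure_mysql_db_py prefix_ default_db out) := by unfold Spec_ensure_mysql_db_py; infer_instance

-- ===== CLAIM (what is proved, stated in full; the proofs are below) =====
def Claim_equal_ensure_mysql_db_py : Prop := ∀ (prefix_ : List String) (default_db : String), Dom_ensure_mysql_db_py prefix_ default_db → Spec_ensure_mysql_db_py prefix_ default_db (ensure_mysql_db_py prefix_ default_db)

-- ===== LEMMAS AND PROOFS =====

def pvDbTok (tok : String) : Bool :=
  tok == "-D" || tok == "--database" || PySem.Str.startswith tok "-D=" || PySem.Str.startswith tok "--database="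

def pvPosTok (tok : String) : Bool :=
  tok ≠ "" && !(PySem.Str.startswith tok "-") && !(tok == "sudo" || tok == "mysql")

theorem hasarg_eq_any (l : List String) :
    mysql_prefix_has_arg l ["-D", "--database"] = l.any pvDbTok := by
  induction l with
  | nil => rfl
  | cons tok rest ih =>
    have h1 : (("-D" : String) ++ "=") = "-D=" := rfl
    have h2 : (("--database" : String) ++ "=") = "--database=" := rfl
    simp only [mysql_prefix_has_arg, List.contains_cons, List.contains_nil, List.any_cons,
      List.any_nil, ih, h1, h2, Bool.or_false]
    rw [Bool.eq_iff_iff]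
    simp [pvDbTok]
    aesop

theorem scan_eq (rem out : List String) (d : String) :
    ensure_mysql_db_scan rem out d = if rem.any pvPosTok then out else out ++ [d] := by
  induction rem with
  | nil => rfl
  | cons tok rest ih =>
    have hcond : (tok ≠ "" && !(PySem.Str.startswith tok "-") && !(tok == "sudo" || tok == "mysql")) = pvPosTok tok := rfl
    simp only [ensure_mysql_db_scan, List.any_cons, ih, hcond]
    by_cases h : pvPosTok tok = true <;> simp [h]

theorem needs_eq (l : List String) :
    ensure_mysql_db_needs l = !(l.any pvDbTok || l.any pvPosTok) := by
  induction l with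
  | nil => rfl
  | cons tok rest ih =>
    have hc1 : (tok == "-D" || tok == "--database" || PySem.Str.startswith tok "-D=" || PySem.Str.startswith tok "--database=") = pvDbTok tok := rfl
    have hc2 : (tok ≠ "" && !(PySem.Str.startswith tok "-") && !(tok == "sudo" || tok == "mysql")) = pvPosTok tok := rfl
    simp only [ensure_mysql_db_needs, List.any_cons, ih, hc1, hc2]
    cases h1 : pvDbTok tok <;> cases h2 : pvPosTok tok <;>
      simp

-- ===== VERDICT (by name: the statement is the Claim_ definition above) =====
theorem ensure_mysql_db_py_spec : Claim_equal_ensure_mysql_db_py := by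
  intro p d _
  show ensure_mysql_db_py p d = ensure_mysql_db_py_alt p d
  simp only [ensure_mysql_db_py, ensure_mysql_db_py_alt, hasarg_eq_any, scan_eq, needs_eq]
  cases hdb : p.any pvDbTok <;> cases hp : p.any pvPosTok <;> simp
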